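-- pv_equiv track=rewrite | github.com/Saff9/ownagent | src/services/agent/orchestrator.py | _detect_search_need
-- ===== SOURCE A (Python) =====
-- def _detect_search_need(message: str) -> bool:
--     """Detect if message requires web search"""
--     search_keywords = [
--         "current", "latest", "news", "today", "weather",
--         "price", "stock", "market", "recent", "update",
--         "happening", "now", "2024", "2025", "2026"
--     ]
--
--     message_lower = message.lower()
--     return any(keyword in message_lower for keyword in search_keywords)
-- ===== SOURCE B (Python) =====
-- _SEARCH_KEYWORDS = (
--     "current", "latest", "news", "today", "weather",
--     "price", "stock", "market", "recent", "update",
--     "happening", "now", "2024", "2025", "2026",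
-- )
--
-- def _detect_search_need(message: str) -> bool:
--     """Single left-to-right scan: at each position of the lowercased
--     message, test whether some keyword starts there."""
--     m = message.lower()
--     for i in range(len(m) + 1):
--         for k in _SEARCH_KEYWORDS:
--             if m.startswith(k, i):
--                 return True
--     return False
-- ===== Notes on version B (the rewrite author's own statement) =====
-- stated objective: alternative
-- what changed: Replaces the keyword-major pass ('k in m' substring search per keyword) with a position-major single left-to-right scan that tests at each index whether some keyword starts there (startswith with offset).
import Mathlib
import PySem

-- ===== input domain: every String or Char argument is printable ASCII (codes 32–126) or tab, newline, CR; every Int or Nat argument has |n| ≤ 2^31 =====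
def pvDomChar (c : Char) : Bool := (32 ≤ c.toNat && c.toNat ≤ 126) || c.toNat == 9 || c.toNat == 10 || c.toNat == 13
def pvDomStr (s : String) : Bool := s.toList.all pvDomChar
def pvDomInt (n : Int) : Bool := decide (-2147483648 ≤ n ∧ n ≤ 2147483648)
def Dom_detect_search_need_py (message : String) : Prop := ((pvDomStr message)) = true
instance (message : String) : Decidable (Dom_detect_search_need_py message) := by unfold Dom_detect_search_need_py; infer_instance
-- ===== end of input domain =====

-- B replaces A's keyword-major substring tests by a position-major left-to-right scan
-- testing at each index whether some keyword starts there (objective: alternative).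

-- ===== PORT A =====
def pvSearchKeywords : List String :=
  ["current", "latest", "news", "today", "weather",
   "price", "stock", "market", "recent", "update",
   "happening", "now", "2024", "2025", "2026"]

def detect_search_need_py (message : String) : Bool :=
  let message_lower := PySem.Str.lower message
  pvSearchKeywords.any (fun keyword => PySem.Str.isIn keyword message_lower)

-- ===== PORT B =====
-- m.startswith(k, i) with 0 ≤ i ≤ len(m) is exactly: k is a prefix of m dropped by i
-- (ported by hand as PySem.Chars.startswith on (m.drop i); exact for the nonnegative
-- in-range offsets B uses).
def detect_search_need_py_alt (message : String) : Bool :=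
  let m := PySem.Chars.lower message.toList
  (List.range (m.length + 1)).any (fun i =>
    pvSearchKeywords.any (fun k => PySem.Chars.startswith (m.drop i) k.toList))

-- ===== PRECONDITION & SPEC =====
def Spec_detect_search_need_py (message : String) (out : Bool) : Prop := out = detect_search_need_py_alt message
instance (message : String) (out : Bool) : Decidable (Spec_detect_search_need_py message out) := by unfold Spec_detect_search_need_py; infer_instance

-- ===== CLAIM (what is proved, stated in full; the proofs are below) =====
def Claim_equal_detect_search_need_py : Prop := ∀ (message : String), Dom_detect_search_need_py message → Spec_detect_search_need_py message (detect_search_need_py message)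

-- ===== LEMMAS AND PROOFS =====

-- 'sub in s' holds iff sub is a prefix of some drop with bounded drop index.
theorem pv_isIn_iff_exists_bounded (sub s : List Char) :
    PySem.Chars.isIn sub s = true ↔ ∃ i < s.length + 1, sub <+: s.drop i := by
  rw [← PySem.Chars.exists_prefix_drop_iff_isIn]
  constructor
  · rintro ⟨j, hj⟩
    by_cases h : j ≤ s.length
    · exact ⟨j, by omega, hj⟩
    · refine ⟨s.length, by omega, ?_⟩
      rw [List.drop_length]
      rwa [List.drop_eq_nil_of_le (by omega)] at hj
  · rintro ⟨i, _, hi⟩; exact ⟨i, hi⟩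

theorem detect_search_need_py_eq (message : String) :
    detect_search_need_py message = detect_search_need_py_alt message := by
  unfold detect_search_need_py detect_search_need_py_alt
  simp only [PySem.Str.isIn_eq, PySem.Str.toList_lower]
  set m := PySem.Chars.lower message.toList with hm
  rw [Bool.eq_iff_iff]
  simp only [List.any_eq_true, List.mem_range, PySem.Chars.startswith_iff,
    pv_isIn_iff_exists_bounded]
  constructor
  · rintro ⟨k, hk, i, hi, hpre⟩; exact ⟨i, hi, k, hk, hpre⟩
  · rintro ⟨i, hi, k, hk, hpre⟩; exact ⟨k, hk, i, hi, hpre⟩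

-- ===== VERDICT (by name: the statement is the Claim_ definition above) =====
theorem detect_search_need_py_spec : Claim_equal_detect_search_need_py := by
  intro message _
  exact detect_search_need_py_eq message
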